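-- pv_equiv track=rewrite | github.com/M-asaki-K/Dokodemo-Nur | dokodemonur.py | loop_erase_full
-- ===== SOURCE A (Python) =====
-- def loop_erase_full(nodes):
--     """
--     一般のループ消去（同一ノードが再出現したら、その間を丸ごと切る）
--     Loop-Erased Path（LERW と同じ要領）
--     """
--     pos = {}   # node -> index in 'out'
--     out = []
--     for n in nodes:
--         if n in pos:
--             i = pos[n]
--             for m in out[i+1:]:
--                 pos.pop(m, None)
--             out = out[:i+1]
--         else:
--             pos[n] = len(out)
--             out.append(n)
--     return out
-- ===== SOURCE B (Python) =====
-- def loop_erase_full(nodes):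
--     """
--     一般のループ消去（同一ノードが再出現したら、その間を丸ごと切る）
--     Jump-past-last-occurrence formulation: precompute each node's LAST index,
--     then walk forward emitting the current node and jumping to just after its
--     last occurrence; nothing is ever removed from the output.
--     """
--     last = {}
--     for i, n in enumerate(nodes):
--         last[n] = i
--     out = []
--     i = 0
--     while i < len(nodes):
--         out.append(nodes[i])
--         i = last[nodes[i]] + 1
--     return out
-- ===== Notes on version B (the rewrite author's own statement) =====
-- stated objective: faster
-- what changed: Replaces the chronological loop-erasure (a position dict plus an output list that is sliced back and whose evicted entries are popped whenever a node repeats) by a forward jump traversal: precompute each node's last index in one pass, then repeatedly emit the current node and jump to just after its last occurrence; nothing is ever removed from the output.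
import Mathlib
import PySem

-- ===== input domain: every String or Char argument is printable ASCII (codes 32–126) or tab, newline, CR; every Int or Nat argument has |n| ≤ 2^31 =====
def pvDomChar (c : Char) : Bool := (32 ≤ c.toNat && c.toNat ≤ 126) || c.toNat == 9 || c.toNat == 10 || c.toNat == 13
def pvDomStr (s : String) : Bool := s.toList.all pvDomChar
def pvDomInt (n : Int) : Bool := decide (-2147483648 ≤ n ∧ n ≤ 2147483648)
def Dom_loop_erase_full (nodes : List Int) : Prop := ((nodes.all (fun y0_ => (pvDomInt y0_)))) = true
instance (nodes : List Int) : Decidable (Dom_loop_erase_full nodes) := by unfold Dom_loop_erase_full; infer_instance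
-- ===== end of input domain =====

-- B replaces A's chronological loop erasure (position dict + output stack cut back on repeats)
-- by a jump traversal over a precomputed last-index table: emit the current node and jump to
-- just after its last occurrence; one pass plus jumps (O(n)) instead of repeated slice copies.

-- ===== PORT A =====
-- one iteration of A's 'for n in nodes' loop over the state (pos, out)
def pvStepA (st : PySem.Dict Int Int × List Int) (n : Int) : PySem.Dict Int Int × List Int :=
  match st.1.get? n with                                    -- 'if n in pos: i = pos[n]'
  | some i =>
      ((PySem.List.slice st.2 (some (i + 1)) none).foldl    -- 'for m in out[i+1:]: pos.pop(m, None)'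
          (fun d m => d.erase m) st.1,
       PySem.List.slice st.2 none (some (i + 1)))           -- 'out = out[:i+1]'
  | none => (st.1.insert n ((st.2.length : Int)), st.2 ++ [n])  -- 'pos[n] = len(out); out.append(n)'

def loop_erase_full (nodes : List Int) : List Int :=
  (nodes.foldl pvStepA (PySem.Dict.empty, [])).2

-- ===== PORT B =====
-- 'last = {}; for i, n in enumerate(nodes): last[n] = i'
def pvLast (nodes : List Int) : PySem.Dict Int Int :=
  (PySem.List.enumerate nodes).foldl (fun d p => d.insert p.2 p.1) PySem.Dict.empty

-- The next two theorems are cited by pvLoop's 'decreasing_by': the last-index table sends each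
-- looked-up node to a position k < len(nodes) that is at least the current one, so 'i' grows.
theorem pvLastFold (x : Int) (l : List Int) : ∀ (s : Nat) (d : PySem.Dict Int Int),
    (x ∉ l → ((PySem.List.enumerate l (s : Int)).foldl
        (fun d p => d.insert p.2 p.1) d).get? x = d.get? x) ∧
    (x ∈ l → ∃ k : Nat, k < l.length ∧
        ((PySem.List.enumerate l (s : Int)).foldl
          (fun d p => d.insert p.2 p.1) d).get? x = some ((s + k : Nat) : Int) ∧
        l[k]? = some x ∧ x ∉ l.drop (k + 1)) := by
  induction l with
  | nil =>
    intro s d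
    exact ⟨fun _ => by simp [PySem.List.enumerate], fun h => by simp at h⟩
  | cons y t ih =>
    intro s d
    have hstep : PySem.List.enumerate (y :: t) (s : Int) =
        ((s : Int), y) :: PySem.List.enumerate t ((s + 1 : Nat) : Int) := by
      rw [PySem.List.enumerate_cons]; push_cast; ring_nf
    rw [hstep]
    simp only [List.foldl_cons]
    refine ⟨?_, ?_⟩
    · intro hx
      have hyx : x ≠ y := fun h => hx (by simp [h])
      have hxt : x ∉ t := fun h => hx (by simp [h])
      rw [(ih (s + 1) (d.insert y (s : Int))).1 hxt]
      exact PySem.Dict.get?_insert_of_ne _ _ hyx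
    · intro hx
      by_cases hxt : x ∈ t
      · obtain ⟨k, hk, hfold, hget, hdrop⟩ := (ih (s + 1) (d.insert y (s : Int))).2 hxt
        exact ⟨k + 1, by simpa using hk, by rw [hfold]; congr 2; omega,
          by simpa using hget, by simpa [List.drop_succ_cons] using hdrop⟩
      · have hyx : y = x := by
          rcases List.mem_cons.mp hx with h | h
          · exact h.symm
          · exact absurd h hxt
        refine ⟨0, by simp, ?_, by simp [hyx], by simpa using hxt⟩
        rw [(ih (s + 1) (d.insert y (s : Int))).1 hxt, hyx]
        simp [PySem.Dict.get?_insert_self]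

theorem pvMemDropOf (nodes : List Int) (m j : Nat) (x : Int)
    (h : nodes[m]? = some x) (hj : j ≤ m) : x ∈ nodes.drop j := by
  have h2 : (nodes.drop j)[m - j]? = some x := by
    rw [List.getElem?_drop, Nat.add_sub_cancel' hj]
    exact h
  exact List.mem_of_getElem? h2

theorem pvLastLe (nodes : List Int) (i x k : Int)
    (hx : PySem.List.pyGet? nodes i = some x)
    (hk : (pvLast nodes).get? x = some k) :
    ∃ kn : Nat, k = (kn : Int) ∧ kn < nodes.length ∧ x ∉ nodes.drop (kn + 1) ∧
      (0 ≤ i → i.toNat ≤ kn) := by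
  have hmem : x ∈ nodes := PySem.List.mem_of_pyGet?_eq_some nodes hx
  obtain ⟨kn, hklen, hfold, hget, hdrop⟩ := (pvLastFold x nodes 0 PySem.Dict.empty).2 hmem
  have hkk : some k = some ((kn : Nat) : Int) := by
    rw [← hk]
    unfold pvLast
    simpa using hfold
  refine ⟨kn, Option.some.inj hkk, hklen, hdrop, ?_⟩
  intro hi
  by_contra hc
  have hx' : nodes[i.toNat]? = some x := by
    unfold PySem.List.pyGet? PySem.List.pyIdx? at hx
    rw [if_pos hi] at hx
    by_cases hlt : i < (nodes.length : Int)
    · rw [if_pos hlt] at hx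
      simpa using hx
    · rw [if_neg hlt] at hx
      simp at hx
  exact hdrop (pvMemDropOf nodes i.toNat (kn + 1) x hx' (by omega))

def pvLoop (nodes : List Int) (i : Int) (out : List Int) : List Int :=
  if i < (nodes.length : Int) then                          -- 'while i < len(nodes)'
    match hx : PySem.List.pyGet? nodes i with
    | none => out                                           -- unreachable: the loop keeps 0 ≤ i < len
    | some x =>
      match hk : (pvLast nodes).get? x with
      | none => out ++ [x]                                  -- unreachable: nodes[i] is a key of 'last'
      | some k => pvLoop nodes (k + 1) (out ++ [x])         -- 'out.append(nodes[i]); i = last[nodes[i]] + 1'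
  else out
termination_by nodes.length - i.toNat
decreasing_by
  obtain ⟨kn, hkk, hklen, -, hka⟩ := pvLastLe nodes i x k hx hk
  by_cases hi : 0 ≤ i
  · have := hka hi
    omega
  · omega

def loop_erase_full_alt (nodes : List Int) : List Int :=
  pvLoop nodes 0 []                                         -- 'out = []; i = 0; while …; return out'

-- ===== PRECONDITION & SPEC =====
def Spec_loop_erase_full (nodes : List Int) (out : List Int) : Prop := out = loop_erase_full_alt nodes
instance (nodes : List Int) (out : List Int) : Decidable (Spec_loop_erase_full nodes out) := by unfold Spec_loop_erase_full; infer_instance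

-- ===== CLAIM (what is proved, stated in full; the proofs are below) =====
def Claim_equal_loop_erase_full : Prop := ∀ (nodes : List Int), Dom_loop_erase_full nodes → Spec_loop_erase_full nodes (loop_erase_full nodes)

-- ===== LEMMAS AND PROOFS =====

-- proof-side model of the jump traversal: recursion on the suffix after the head's last
-- occurrence (pvEnumLast/pvCutSpec characterise that scan and justify the recursion)
theorem pvEnumLast (x : Int) (l : List Int) : ∀ (s : Nat) (c : Int),
    (x ∉ l → (PySem.List.enumerate l (s : Int)).foldl
        (fun c p => if p.2 = x then p.1 else c) c = c) ∧
    (x ∈ l → ∃ k : Nat, k < l.length ∧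
        (PySem.List.enumerate l (s : Int)).foldl
          (fun c p => if p.2 = x then p.1 else c) c = ((s + k : Nat) : Int) ∧
        l[k]? = some x ∧ x ∉ l.drop (k + 1)) := by
  induction l with
  | nil =>
    intro s c
    exact ⟨fun _ => by simp [PySem.List.enumerate], fun h => by simp at h⟩
  | cons y t ih =>
    intro s c
    have hstep : PySem.List.enumerate (y :: t) (s : Int) =
        ((s : Int), y) :: PySem.List.enumerate t ((s + 1 : Nat) : Int) := by
      rw [PySem.List.enumerate_cons]; push_cast; ring_nf
    refine ⟨?_, ?_⟩
    · intro hx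
      have hyx : ¬ y = x := fun h => hx (by simp [h])
      have hxt : x ∉ t := fun h => hx (by simp [h])
      rw [hstep]; simp only [List.foldl_cons, if_neg hyx]
      exact (ih (s + 1) c).1 hxt
    · intro hx
      by_cases hxt : x ∈ t
      · obtain ⟨k, hk, hfold, hget, hdrop⟩ :=
          (ih (s + 1) (if y = x then (s : Int) else c)).2 hxt
        refine ⟨k + 1, by simpa using hk, ?_, by simpa using hget,
          by simpa [List.drop_succ_cons] using hdrop⟩
        rw [hstep]; simp only [List.foldl_cons]
        rw [hfold]; push_cast; ring
      · have hyx : y = x := by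
          rcases List.mem_cons.mp hx with h | h
          · exact h.symm
          · exact absurd h hxt
        refine ⟨0, by simp, ?_, by simp [hyx], by simpa using hxt⟩
        rw [hstep]; simp only [List.foldl_cons, if_pos hyx]
        rw [(ih (s + 1) ((s : Nat) : Int)).1 hxt]
        push_cast; ring

theorem pvCutSpec (x : Int) (rest : List Int) :
    ∃ k : Nat, k < (x :: rest).length ∧
      (PySem.List.enumerate (x :: rest)).foldl
          (fun c p => if p.2 = x then p.1 else c) 0 = (k : Int) ∧
      PySem.List.slice (x :: rest) (some ((k : Int) + 1)) none = (x :: rest).drop (k + 1) ∧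
      (x :: rest)[k]? = some x ∧ x ∉ (x :: rest).drop (k + 1) := by
  obtain ⟨k, hk, hfold, hget, hdrop⟩ :=
    (pvEnumLast x (x :: rest) 0 0).2 (List.mem_cons_self)
  refine ⟨k, hk, ?_, ?_, hget, hdrop⟩
  · simpa using hfold
  · rw [show ((k : Int) + 1) = ((k + 1 : Nat) : Int) by push_cast; ring]
    exact PySem.List.slice_from_natCast (x :: rest) (k + 1)

def pvJumpModel (nodes : List Int) : List Int :=
  match nodes with
  | [] => []                                                -- 'while nodes' never runs
  | x :: rest =>
      -- 'cut = 0; for i, n in enumerate(nodes): if n == x: cut = i'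
      let cut := (PySem.List.enumerate (x :: rest)).foldl
          (fun c p => if p.2 = x then p.1 else c) 0
      -- 'out.append(x); nodes = nodes[cut + 1:]' — the while loop continues on the suffix
      x :: pvJumpModel (PySem.List.slice (x :: rest) (some (cut + 1)) none)
termination_by nodes.length
decreasing_by
  obtain ⟨k, hk, hcut, hslice, -, -⟩ := pvCutSpec x rest
  simp only [dite_eq_ite]
  rw [hcut, hslice]
  simp only [List.length_drop, List.length_cons] at hk ⊢
  omega


-- the common abstract model: A's loop body with the position dict replaced by idxOf
def pvStep (out : List Int) (n : Int) : List Int :=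
  if n ∈ out then out.take (out.idxOf n + 1) else out ++ [n]

-- the items list of the position dict A maintains, reconstructed from the output list
def pvPairs : List Int → Nat → List (Int × Int)
  | [], _ => []
  | y :: t, s => (y, (s : Int)) :: pvPairs t (s + 1)

theorem pvPairs_append (a b : List Int) : ∀ s : Nat,
    pvPairs (a ++ b) s = pvPairs a s ++ pvPairs b (s + a.length) := by
  induction a with
  | nil => intro s; simp [pvPairs]
  | cons y t ih =>
    intro s
    simp only [List.cons_append, pvPairs, ih (s + 1), List.length_cons]
    congr 3
    omega

theorem pvGet_pairs (n : Int) (l : List Int) : ∀ s : Nat,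
    (PySem.Dict.mk (pvPairs l s)).get? n =
      if n ∈ l then some ((s + l.idxOf n : Nat) : Int) else none := by
  induction l with
  | nil => intro s; simp [pvPairs, PySem.Dict.get?]
  | cons y t ih =>
    intro s
    simp only [pvPairs, PySem.Dict.get?, List.find?_cons]
    by_cases hyn : y = n
    · simp [hyn]
    · have : (y == n) = false := by simpa using hyn
      simp only [this]
      have := ih (s + 1)
      simp only [PySem.Dict.get?] at this
      rw [this]
      by_cases hnt : n ∈ t
      · simp only [List.mem_cons, hnt, or_true, if_pos]
        rw [List.idxOf_cons_ne _ hyn]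
        congr 1
        omega
      · have : n ∉ y :: t := by simp [hnt, Ne.symm hyn]
        simp [hnt, this]

theorem pvEraseFold (ms : List Int) : ∀ L : List (Int × Int),
    ms.foldl (fun d m => d.erase m) (PySem.Dict.mk L) =
      PySem.Dict.mk (L.filter (fun p => decide (p.1 ∉ ms))) := by
  induction ms with
  | nil => intro L; simp
  | cons m ms ih =>
    intro L
    simp only [List.foldl_cons]
    rw [show (PySem.Dict.mk L).erase m =
        PySem.Dict.mk (L.filter (fun p => !(p.1 == m))) from rfl, ih]
    congr 1
    rw [List.filter_filter]
    apply List.filter_congr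
    intro p _
    by_cases h1 : p.1 = m <;> by_cases h2 : p.1 ∈ ms <;> simp [h1, h2]

theorem pvPairs_fst_mem (p : Int × Int) (l : List Int) : ∀ s : Nat,
    p ∈ pvPairs l s → p.1 ∈ l := by
  induction l with
  | nil => intro s h; simp [pvPairs] at h
  | cons y t ih =>
    intro s h
    rcases List.mem_cons.mp h with h | h
    · simp [h]
    · exact List.mem_cons.mpr (Or.inr (ih (s + 1) h))

theorem pvStepA_sim (out : List Int) (n : Int) (h : out.Nodup) :
    pvStepA (PySem.Dict.mk (pvPairs out 0), out) n =
      (PySem.Dict.mk (pvPairs (pvStep out n) 0), pvStep out n) := by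
  by_cases hm : n ∈ out
  · have hget : (PySem.Dict.mk (pvPairs out 0)).get? n = some ((out.idxOf n : Nat) : Int) := by
      rw [pvGet_pairs n out 0]
      simp [hm]
    set j : Nat := out.idxOf n + 1 with hj
    have hcast : ((out.idxOf n : Nat) : Int) + 1 = ((j : Nat) : Int) := by push_cast [hj]; ring
    have htake : PySem.List.slice out none (some (((out.idxOf n : Nat) : Int) + 1)) = out.take j := by
      rw [hcast]; exact PySem.List.slice_to_natCast out j
    have hdrop : PySem.List.slice out (some (((out.idxOf n : Nat) : Int) + 1)) none = out.drop j := by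
      rw [hcast]; exact PySem.List.slice_from_natCast out j
    have hsplit : out.take j ++ out.drop j = out := List.take_append_drop j out
    have hnd : (out.take j ++ out.drop j).Nodup := by rw [hsplit]; exact h
    have hdisj : ∀ m ∈ out.take j, m ∉ out.drop j := by
      have h2 := (List.nodup_append.mp hnd).2.2
      exact fun m hm' hd => h2 m hm' m hd rfl
    have hP : pvPairs out 0 =
        pvPairs (out.take j) 0 ++ pvPairs (out.drop j) (0 + (out.take j).length) := by
      conv_lhs => rw [← hsplit]
      rw [pvPairs_append]
    have herase : (out.drop j).foldl (fun d m => d.erase m) (PySem.Dict.mk (pvPairs out 0)) =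
        PySem.Dict.mk (pvPairs (out.take j) 0) := by
      rw [pvEraseFold]
      congr 1
      have h1 : ∀ p ∈ pvPairs (out.take j) 0,
          (decide (p.1 ∉ out.drop j)) = true := fun p hp =>
        decide_eq_true (hdisj p.1 (pvPairs_fst_mem p _ _ hp))
      have h2 : ∀ p ∈ pvPairs (out.drop j) (0 + (out.take j).length),
          ¬ ((decide (p.1 ∉ out.drop j)) = true) := by
        intro p hp
        simp only [decide_eq_true_eq, not_not]
        exact pvPairs_fst_mem p _ _ hp
      rw [hP, List.filter_append, List.filter_eq_self.mpr h1,
        List.filter_eq_nil_iff.mpr h2, List.append_nil]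
    have hstep : pvStep out n = out.take j := by simp [pvStep, hm, hj]
    simp only [pvStepA, hget, hstep, htake, hdrop, herase]
  · have hget : (PySem.Dict.mk (pvPairs out 0)).get? n = none := by
      rw [pvGet_pairs n out 0]; simp [hm]
    have hcont : (PySem.Dict.mk (pvPairs out 0)).contains n = false := by
      rw [PySem.Dict.contains_eq_isSome_get?, hget]; rfl
    have hins : (PySem.Dict.mk (pvPairs out 0)).insert n ((out.length : Nat) : Int) =
        PySem.Dict.mk (pvPairs (out ++ [n]) 0) := by
      rw [PySem.Dict.insert]
      simp only [hcont, Bool.false_eq_true, reduceIte]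
      congr 1
      rw [pvPairs_append]
      simp [pvPairs]
    have hstep : pvStep out n = out ++ [n] := by simp [pvStep, hm]
    simp only [pvStepA, hget, hstep, hins]

theorem pvStep_nodup (out : List Int) (n : Int) (h : out.Nodup) : (pvStep out n).Nodup := by
  unfold pvStep
  split
  · exact (List.take_sublist _ _).nodup h
  · rename_i hm
    simp only [List.nodup_append, List.nodup_cons, List.not_mem_nil, not_false_iff,
      List.nodup_nil, and_true, true_and]
    refine ⟨h, ?_⟩
    intro a ha b hb
    simp only [List.mem_singleton] at hb
    exact fun hab => hm ((hab.trans hb) ▸ ha)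

theorem pvFoldA_sim (ns : List Int) : ∀ out : List Int, out.Nodup →
    ns.foldl pvStepA (PySem.Dict.mk (pvPairs out 0), out) =
      (PySem.Dict.mk (pvPairs (ns.foldl pvStep out) 0), ns.foldl pvStep out) := by
  induction ns with
  | nil => intro out h; simp
  | cons n ns ih =>
    intro out h
    simp only [List.foldl_cons]
    rw [pvStepA_sim out n h, ih (pvStep out n) (pvStep_nodup out n h)]

theorem pvLift (x : Int) (ns : List Int) (hx : x ∉ ns) : ∀ out : List Int,
    ns.foldl pvStep (x :: out) = x :: ns.foldl pvStep out := by
  induction ns with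
  | nil => intro out; simp
  | cons n ns ih =>
    intro out
    have hnx : n ≠ x := fun h => hx (h ▸ List.mem_cons_self)
    have hx' : x ∉ ns := fun h => hx (List.mem_cons.mpr (Or.inr h))
    simp only [List.foldl_cons]
    have hstep : pvStep (x :: out) n = x :: pvStep out n := by
      unfold pvStep
      by_cases hm : n ∈ out
      · rw [if_pos (List.mem_cons.mpr (Or.inr hm)), if_pos hm,
          List.idxOf_cons_ne _ (Ne.symm hnx), List.take_succ_cons]
      · rw [if_neg (by simp [hnx, hm]), if_neg hm, List.cons_append]
    rw [hstep, ih hx' (pvStep out n)]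

theorem pvHead (x : Int) (ns : List Int) : ∀ o : List Int,
    ∃ o', ns.foldl pvStep (x :: o) = x :: o' := by
  induction ns with
  | nil => intro o; exact ⟨o, rfl⟩
  | cons n ns ih =>
    intro o
    have hstep : ∃ o2, pvStep (x :: o) n = x :: o2 := by
      unfold pvStep
      split
      · exact ⟨o.take ((x :: o).idxOf n), List.take_succ_cons⟩
      · exact ⟨o ++ [n], by simp⟩
    obtain ⟨o2, h2⟩ := hstep
    simp only [List.foldl_cons, h2]
    exact ih o2

theorem pvCollapse (x : Int) (s : List Int) (o : List Int) :
    (s ++ [x]).foldl pvStep (x :: o) = [x] := by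
  obtain ⟨o', h'⟩ := pvHead x s o
  rw [List.foldl_append, h']
  simp [pvStep, List.idxOf_cons_self]

theorem pvMainAux : ∀ (N : Nat) (nodes : List Int), nodes.length ≤ N →
    nodes.foldl pvStep [] = pvJumpModel nodes := by
  intro N
  induction N with
  | zero =>
    intro nodes h
    rw [List.eq_nil_of_length_eq_zero (Nat.le_zero.mp h)]
    simp [pvJumpModel]
  | succ N ih =>
    intro nodes hlen
    match nodes with
    | [] => simp [pvJumpModel]
    | x :: rest =>
      obtain ⟨k, hk, hcut, hslice, hget, hdrop⟩ := pvCutSpec x rest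
      have halt : pvJumpModel (x :: rest) =
          x :: pvJumpModel ((x :: rest).drop (k + 1)) := by
        conv_lhs => rw [pvJumpModel]
        simp only [hcut, hslice]
      rw [halt]
      have hstart : pvStep [] x = [x] := by simp [pvStep]
      rw [List.foldl_cons, hstart]
      have hrest : rest.length ≤ N := by simpa using hlen
      cases k with
      | zero =>
        have hdx : x ∉ rest := by simpa using hdrop
        rw [show ([x] : List Int) = x :: [] from rfl, pvLift x rest hdx []]
        simp only [List.drop_succ_cons, List.drop_zero]
        rw [ih rest hrest]
      | succ m =>
        have hm : m < rest.length := by simpa using hk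
        have hgx : rest[m]? = some x := by simpa using hget
        have hgx' : rest[m]'hm = x := by
          have := List.getElem?_eq_getElem hm
          rw [this] at hgx
          exact Option.some.inj hgx
        have hsplit : rest = (rest.take m ++ [x]) ++ rest.drop (m + 1) := by
          conv_lhs => rw [← List.take_append_drop m rest]
          rw [← List.getElem_cons_drop hm, hgx']
          simp
        have hdx : x ∉ rest.drop (m + 1) := by
          simpa [List.drop_succ_cons] using hdrop
        rw [show ([x] : List Int) = x :: [] from rfl]
        conv_lhs => rw [hsplit]
        rw [List.foldl_append, pvCollapse x (rest.take m) []]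
        rw [show ([x] : List Int) = x :: [] from rfl, pvLift x _ hdx []]
        have hlen2 : (rest.drop (m + 1)).length ≤ N := by
          simp only [List.length_drop]
          omega
        rw [ih _ hlen2]
        simp [List.drop_succ_cons]

theorem pvMain (nodes : List Int) :
    nodes.foldl pvStep [] = pvJumpModel nodes :=
  pvMainAux nodes.length nodes le_rfl

-- bridge: the dict-driven while loop of port B computes the jump-recursion model on the suffix
theorem pvLoopBridge : ∀ (M : Nat) (nodes : List Int) (j : Nat) (out : List Int),
    nodes.length - j ≤ M → pvLoop nodes (j : Int) out = out ++ pvJumpModel (nodes.drop j) := by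
  intro M
  induction M with
  | zero =>
    intro nodes j out h
    have hj : nodes.length ≤ j := by omega
    rw [pvLoop, if_neg (by exact_mod_cast Nat.not_lt.mpr hj),
      List.drop_eq_nil_of_le hj]
    simp [pvJumpModel]
  | succ M ih =>
    intro nodes j out h
    by_cases hj : j < nodes.length
    · have hxg : PySem.List.pyGet? nodes (j : Int) = some (nodes[j]'hj) := by
        rw [PySem.List.pyGet?_natCast]
        exact List.getElem?_eq_getElem hj
      obtain ⟨kn, hklen, hfold, hget, hdrop⟩ :=
        (pvLastFold (nodes[j]'hj) nodes 0 PySem.Dict.empty).2 (List.getElem_mem hj)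
      have hkg : (pvLast nodes).get? (nodes[j]'hj) = some ((kn : Nat) : Int) := by
        unfold pvLast
        simpa using hfold
      have hjk : j ≤ kn := by
        by_contra hc
        exact hdrop (pvMemDropOf nodes j (kn + 1) _ (List.getElem?_eq_getElem hj) (by omega))
      rw [pvLoop, if_pos (by exact_mod_cast hj)]
      split
      · rename_i heq; rw [hxg] at heq; cases heq
      · rename_i x' heq
        rw [hxg] at heq
        cases heq
        split
        · rename_i heq2; rw [hkg] at heq2; cases heq2
        · rename_i k' heq2
          rw [hkg] at heq2
          cases heq2
          rw [show ((kn : Int) + 1) = ((kn + 1 : Nat) : Int) by push_cast; ring,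
            ih nodes (kn + 1) _ (by omega)]
          have hsuffix : nodes.drop j = nodes[j]'hj :: nodes.drop (j + 1) :=
            List.drop_eq_getElem_cons hj
          obtain ⟨c, hclen, hcut, hslice, hget', hdrop'⟩ :=
            pvCutSpec (nodes[j]'hj) (nodes.drop (j + 1))
          have halt : pvJumpModel (nodes.drop j) =
              nodes[j]'hj ::
                pvJumpModel ((nodes[j]'hj :: nodes.drop (j + 1)).drop (c + 1)) := by
            rw [hsuffix]
            conv_lhs => rw [pvJumpModel]
            simp only [hcut, hslice]
          have hgx2 : nodes[j + c]? = some (nodes[j]'hj) := by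
            have h2 : (nodes.drop j)[c]? = some (nodes[j]'hj) := by rw [hsuffix]; exact hget'
            rwa [List.getElem?_drop] at h2
          have hub : j + c ≤ kn := by
            by_contra hc2
            exact hdrop (pvMemDropOf nodes (j + c) (kn + 1) _ hgx2 (by omega))
          have hdropeq : (nodes[j]'hj :: nodes.drop (j + 1)).drop (c + 1) =
              nodes.drop (j + c + 1) := by
            rw [List.drop_succ_cons, List.drop_drop]
            congr 1
            omega
          have hlb : kn ≤ j + c := by
            by_contra hc2
            apply hdrop'
            exact hdropeq ▸ pvMemDropOf nodes kn (j + c + 1) _ hget (by omega)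
          have hkeq : j + c = kn := le_antisymm hub hlb
          rw [halt, hdropeq, hkeq]
          simp
    · have hj' : nodes.length ≤ j := by omega
      rw [pvLoop, if_neg (by exact_mod_cast Nat.not_lt.mpr hj'),
        List.drop_eq_nil_of_le hj']
      simp [pvJumpModel]

-- ===== VERDICT (by name: the statement is the Claim_ definition above) =====
theorem loop_erase_full_spec : Claim_equal_loop_erase_full := by
  intro nodes _
  unfold Spec_loop_erase_full loop_erase_full loop_erase_full_alt
  have h := pvFoldA_sim nodes [] List.nodup_nil
  simp only [pvPairs] at h
  rw [show (PySem.Dict.empty : PySem.Dict Int Int) = PySem.Dict.mk [] from rfl, h]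
  have hb := pvLoopBridge nodes.length nodes 0 [] (by omega)
  simp only [Nat.cast_zero, List.drop_zero, List.nil_append] at hb
  rw [hb]
  exact pvMain nodes
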